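-- pv_equiv track=rewrite | github.com/WincAcademy/wincpy | wincpy/solutions/c545bc87620d4ced81cbddb8a90b4a51/main.py | alphabet_set
-- ===== SOURCE A (Python) =====
-- def alphabet_set(countries):
--     # Assembles alphabet
--     countries = [country.lower() for country in countries]
--
--     letters_needed = list("abcdefghijklmnopqrstuvwxyz")
--     countries_used = []
--     for country in countries:
--         for char in country:
--             if char in letters_needed:
--                 letters_needed.remove(char)
--                 if country not in countries_used:
--                     countries_used.append(country)
--         if len(letters_needed) == 0:
--             return countries_used
-- ===== SOURCE B (Python) =====
-- def alphabet_set(countries):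
--     # Stage 1: lowercase everything.
--     lows = [c.lower() for c in countries]
--     full = set("abcdefghijklmnopqrstuvwxyz")
--     # Stage 2: find the cutoff: the first index whose prefix covers the alphabet.
--     covered = set()
--     stop = None
--     for i, c in enumerate(lows):
--         covered |= set(c) & full
--         if full <= covered:
--             stop = i
--             break
--     if stop is None:
--         return None
--     # Stage 3: over that prefix, keep each country that brings a new letter.
--     result = []
--     seen = set()
--     for c in lows[:stop + 1]:
--         letters = set(c) & full
--         if letters - seen:
--             result.append(c)
--         seen |= letters
--     return result
-- ===== Notes on version B (the rewrite author's own statement) =====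
-- stated objective: faster
-- what changed: Replaces A's single greedy pass that mutates a 26-letter list per character (list membership test and list.remove per char, plus a de-duplicating membership scan of the output list) by staged passes: one pass accumulates a monotone prefix-union of covered letters with set operations to find the cutoff index where the alphabet is complete, then a second pass over that truncated prefix keeps each country that contributes a new letter.
import Mathlib
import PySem

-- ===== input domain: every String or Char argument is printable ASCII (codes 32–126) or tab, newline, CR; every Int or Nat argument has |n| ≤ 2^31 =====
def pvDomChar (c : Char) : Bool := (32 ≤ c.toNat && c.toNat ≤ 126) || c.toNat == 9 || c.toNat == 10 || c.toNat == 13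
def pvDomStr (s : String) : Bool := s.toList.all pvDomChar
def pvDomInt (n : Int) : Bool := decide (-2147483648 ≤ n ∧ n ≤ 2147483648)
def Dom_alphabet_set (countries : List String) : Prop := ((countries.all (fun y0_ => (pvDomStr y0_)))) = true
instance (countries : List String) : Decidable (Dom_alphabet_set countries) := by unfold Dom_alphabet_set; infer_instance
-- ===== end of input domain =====

-- B replaces A's single greedy pass (per-character list mutation) by staged passes: one pass finds the
-- cutoff index where the prefix union covers the alphabet, a second pass over that prefix keeps the
-- countries that contribute a new letter (alternative decomposition; same results).

-- ===== PORT A =====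
-- inner loop: 'for char in country: if char in letters_needed: letters_needed.remove(char); if country not in countries_used: countries_used.append(country)'
-- List.erase removes the first occurrence by ==, exactly list.remove here (presence was just checked).
def pvInnerA : List Char → String → List Char → List String → List Char × List String
  | [], _, letters, used => (letters, used)
  | ch :: cs, c, letters, used =>
    if letters.contains ch then
      pvInnerA cs c (letters.erase ch) (if used.contains c then used else used ++ [c])
    else
      pvInnerA cs c letters used

-- outer loop: per country run the inner loop, then 'if len(letters_needed) == 0: return countries_used'; falling off the end returns None
def pvGoA : List String → List Char → List String → Option (List String)
  | [], _, _ => none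
  | c :: rest, letters, used =>
    let r := pvInnerA c.toList c letters used
    if r.1.length = 0 then some r.2 else pvGoA rest r.1 r.2

def alphabet_set (countries : List String) : Option (List String) :=
  pvGoA (countries.map PySem.Str.lower) "abcdefghijklmnopqrstuvwxyz".toList []

-- ===== PORT B =====
-- stage-2 loop: 'for i, c in enumerate(lows): covered |= set(c) & full; if full <= covered: stop = i; break'
def pvStopLoop : List String → Int → PySem.Set Char → Option Int
  | [], _, _ => none
  | c :: rest, i, covered =>
    let covered' := PySem.Set.union covered
      (PySem.Set.inter (PySem.Set.ofList c.toList) (PySem.Set.ofList "abcdefghijklmnopqrstuvwxyz".toList))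
    if PySem.Set.issubset (PySem.Set.ofList "abcdefghijklmnopqrstuvwxyz".toList) covered' then some i
    else pvStopLoop rest (i + 1) covered'

-- stage-3 loop: 'for c in lows[:stop+1]: letters = set(c) & full; if letters - seen: result.append(c); seen |= letters'
def pvBuildB : List String → PySem.Set Char → List String
  | [], _ => []
  | c :: rest, seen =>
    let letters := PySem.Set.inter (PySem.Set.ofList c.toList) (PySem.Set.ofList "abcdefghijklmnopqrstuvwxyz".toList)
    if PySem.Set.diff letters seen ≠ [] then c :: pvBuildB rest (PySem.Set.union seen letters)
    else pvBuildB rest (PySem.Set.union seen letters)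

def alphabet_set_alt (countries : List String) : Option (List String) :=
  let lows := countries.map PySem.Str.lower
  match pvStopLoop lows 0 PySem.Set.empty with
  | none => none
  | some i => some (pvBuildB (PySem.List.slice lows none (some (i + 1))) PySem.Set.empty)

-- ===== PRECONDITION & SPEC =====
def Spec_alphabet_set (countries : List String) (out : Option (List String)) : Prop := out = alphabet_set_alt countries
instance (countries : List String) (out : Option (List String)) : Decidable (Spec_alphabet_set countries out) := by unfold Spec_alphabet_set; infer_instance

-- ===== CLAIM (what is proved, stated in full; the proofs are below) =====
def Claim_equal_alphabet_set : Prop := ∀ (countries : List String), Dom_alphabet_set countries → Spec_alphabet_set countries (alphabet_set countries)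

-- ===== LEMMAS AND PROOFS =====

-- common reference function both ports are reduced to: greedy selection over the remaining letters
def pvG : List String → List Char → Option (List String)
  | [], _ => none
  | c :: cs, letters =>
    if c.toList.any (fun ch => letters.contains ch) then
      if (letters.filter (fun ch => ¬ c.toList.contains ch)).length = 0 then some [c]
      else Option.map (fun r => c :: r) (pvG cs (letters.filter (fun ch => ¬ c.toList.contains ch)))
    else pvG cs letters

-- A's inner loop filters the contributed characters out of `letters` and appends `c` (once) iff some character hit.
lemma pvInnerA_spec (cs : List Char) (c : String) :
    ∀ (letters : List Char) (used : List String), letters.Nodup →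
    pvInnerA cs c letters used =
      (letters.filter (fun ch => ¬ cs.contains ch),
       if cs.any (fun ch => letters.contains ch) then
         (if used.contains c then used else used ++ [c]) else used) := by
  induction cs with
  | nil => intro letters used _; simp [pvInnerA]
  | cons ch cs ih =>
    intro letters used hnd
    by_cases h : letters.contains ch
    · rw [pvInnerA, if_pos h, ih _ _ (hnd.erase ch)]
      simp only [Prod.mk.injEq]
      refine ⟨?_, ?_⟩
      · rw [List.Nodup.erase_eq_filter hnd, List.filter_filter]
        apply List.filter_congr
        intro x _
        by_cases h1 : x ∈ cs <;> by_cases h2 : x = ch <;> simp [h1, h2]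
      · have h' : ch ∈ letters := by simpa using h
        have hcu : c ∈ (if c ∈ used then used else used ++ [c]) := by
          by_cases hc2 : c ∈ used <;> simp [hc2]
        simp [List.any_cons, h', hcu]
    · rw [pvInnerA, if_neg h, ih _ _ hnd]
      have hx : ∀ x ∈ letters, x ≠ ch := by
        intro x hx hxe; exact h (by simpa [hxe] using List.contains_iff_mem.mpr hx)
      simp only [Prod.mk.injEq]
      refine ⟨?_, ?_⟩
      · apply List.filter_congr
        intro x hxl
        simp [hx x hxl]
      · have h' : ch ∉ letters := by simpa using h
        simp [List.any_cons, h']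

-- A's outer loop equals pvG with the pending `used` prefix appended in front.
lemma pvGoA_eq_g (cs : List String) :
    ∀ (letters : List Char) (used : List String), letters.Nodup → letters ≠ [] →
    (∀ s ∈ used, ∀ ch ∈ s.toList, ch ∉ letters) →
    pvGoA cs letters used = (pvG cs letters).map (used ++ ·) := by
  induction cs with
  | nil => intro letters used _ _ _; simp [pvGoA, pvG]
  | cons c rest ih =>
    intro letters used hnd hne hinv
    simp only [pvGoA, pvG]
    rw [pvInnerA_spec _ _ _ _ hnd]
    by_cases hany : (c.toList.any (fun ch => letters.contains ch)) = true
    · have hcu : ¬ (used.contains c = true) := by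
        simp only [List.contains_iff_mem]
        intro hmem
        obtain ⟨x, hx1, hx2⟩ := List.any_eq_true.mp hany
        exact hinv _ hmem x hx1 (by simpa using hx2)
      simp only [if_pos hany, if_neg hcu]
      by_cases hemp : (letters.filter (fun ch => ¬ c.toList.contains ch)).length = 0
      · rw [if_pos hemp, if_pos hemp]
        simp
      · rw [if_neg hemp, if_neg hemp,
          ih _ _ (hnd.filter _) (by simpa [List.length_eq_zero_iff] using hemp) ?_]
        · cases pvG rest (letters.filter (fun ch => ¬ c.toList.contains ch)) <;> simp
        · intro s hs x hx hxf
          have hxl := List.mem_filter.mp hxf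
          rcases List.mem_append.mp hs with hs | hs
          · exact hinv s hs x hx hxl.1
          · have hsc : s = c := by simpa using hs
            have hxn : ¬ (x ∈ s.toList) := by rw [hsc]; simpa using hxl.2
            exact hxn hx
    · have hnot : ∀ x ∈ c.toList, x ∉ letters := by simpa using hany
      have hsame : letters.filter (fun ch => ¬ c.toList.contains ch) = letters := by
        apply List.filter_eq_self.mpr
        intro x hx
        have hxn : x ∉ c.toList := fun hc => hnot x hc hx
        simp [hxn]
      simp only [if_neg hany]
      rw [hsame, if_neg (by simpa [List.length_eq_zero_iff] using hne)]
      exact ih letters used hnd hne hinv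

-- the stop index never goes below the running counter
lemma pvStopLoop_ge (lows : List String) :
    ∀ (k : Int) (covered : PySem.Set Char) (i : Int), pvStopLoop lows k covered = some i → k ≤ i := by
  induction lows with
  | nil => intro k covered i h; simp [pvStopLoop] at h
  | cons c rest ih =>
    intro k covered i h
    simp only [pvStopLoop] at h
    split at h
    · have : k = i := by exact Option.some.inj h
      omega
    · have := ih (k + 1) _ i h
      omega

-- B's two passes equal pvG, tracked by the covered set.
lemma pvB_eq_g (lows : List String) :
    ∀ (k : Int) (covered : List Char),
    "abcdefghijklmnopqrstuvwxyz".toList.filter (fun ch => ch ∉ covered) ≠ [] →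
    (match pvStopLoop lows k covered with
     | none => none
     | some i => some (pvBuildB (lows.take ((i - k).toNat + 1)) covered))
    = pvG lows ("abcdefghijklmnopqrstuvwxyz".toList.filter (fun ch => ch ∉ covered)) := by
  induction lows with
  | nil => intro k covered _; simp [pvStopLoop, pvG]
  | cons c rest ih =>
    intro k covered hne
    simp only [pvStopLoop, pvG]
    set F : List Char := "abcdefghijklmnopqrstuvwxyz".toList with hF
    set lset : PySem.Set Char := PySem.Set.inter (PySem.Set.ofList c.toList) (PySem.Set.ofList F) with hlset
    set covered' : PySem.Set Char := PySem.Set.union covered lset with hcov'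
    have hmem_lset : ∀ x : Char, x ∈ lset ↔ x ∈ c.toList ∧ x ∈ F := by
      intro x
      rw [hlset, PySem.Set.mem_inter, PySem.Set.mem_ofList, PySem.Set.mem_ofList]
    have hmem_cov' : ∀ x : Char, x ∈ covered' ↔ x ∈ covered ∨ (x ∈ c.toList ∧ x ∈ F) := by
      intro x
      rw [hcov', PySem.Set.mem_union, hmem_lset]
    have hletters' : F.filter (fun ch => ch ∉ covered') =
        (F.filter (fun ch => ch ∉ covered)).filter (fun ch => ¬ c.toList.contains ch) := by
      rw [List.filter_filter]
      apply List.filter_congr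
      intro x hxF
      by_cases h1 : x ∈ covered <;> by_cases h2 : x ∈ c.toList <;>
        simp [hmem_cov', h1, h2, hxF]
    by_cases hsub : PySem.Set.issubset (PySem.Set.ofList F) covered' = true
    · -- the alphabet is completed at this country
      have hsub' : ∀ x ∈ F, x ∈ covered' := by
        intro x hx
        exact (PySem.Set.issubset_iff _ _).mp hsub x ((PySem.Set.mem_ofList _ _).mpr hx)
      obtain ⟨x, hxmem⟩ := List.exists_mem_of_ne_nil _ hne
      have hxF : x ∈ F ∧ x ∉ covered := by simpa using List.mem_filter.mp hxmem
      have hxc : x ∈ c.toList := by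
        rcases (hmem_cov' x).mp (hsub' x hxF.1) with h | h
        · exact absurd h hxF.2
        · exact h.1
      have hhit : (c.toList.any (fun ch => (F.filter (fun ch => ch ∉ covered)).contains ch)) = true := by
        refine List.any_eq_true.mpr ⟨x, hxc, ?_⟩
        simpa using hxmem
      have hdiff : PySem.Set.diff lset covered ≠ [] := by
        intro hnil
        have hx' : x ∈ PySem.Set.diff lset covered := by
          rw [PySem.Set.mem_diff, hmem_lset]
          exact ⟨⟨hxc, hxF.1⟩, hxF.2⟩
        rw [hnil] at hx'; simp at hx'
      have hempty : ((F.filter (fun ch => ch ∉ covered)).filter (fun ch => ¬ c.toList.contains ch)).length = 0 := by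
        rw [List.length_eq_zero_iff, ← hletters']
        apply List.filter_eq_nil_iff.mpr
        intro x hx
        simp [hsub' x hx]
      simp only [if_pos hsub]
      rw [if_pos hhit, if_pos hempty]
      have h1 : (k - k).toNat + 1 = 1 := by omega
      rw [h1]
      simp only [List.take_succ_cons, List.take_zero, pvBuildB]
      rw [← hF, ← hlset, if_pos hdiff]
    · -- alphabet not completed here: the stop loop recurses
      have hne' : F.filter (fun ch => ch ∉ covered') ≠ [] := by
        have hex : ∃ x ∈ F, x ∉ covered' := by
          by_contra hcon
          push Not at hcon
          exact hsub ((PySem.Set.issubset_iff _ _).mpr (fun x hx =>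
            hcon x ((PySem.Set.mem_ofList _ _).mp hx)))
        obtain ⟨x, hx1, hx2⟩ := hex
        intro hnil
        have hx' : x ∈ F.filter (fun ch => ch ∉ covered') := by
          rw [List.mem_filter]; exact ⟨hx1, by simpa using hx2⟩
        rw [hnil] at hx'; simp at hx'
      rw [if_neg hsub]
      by_cases hhit : (c.toList.any (fun ch => (F.filter (fun ch => ch ∉ covered)).contains ch)) = true
      · -- contributing country
        have hdiff : PySem.Set.diff lset covered ≠ [] := by
          obtain ⟨x, hx1, hx2⟩ := List.any_eq_true.mp hhit
          have hx2' : x ∈ F ∧ x ∉ covered := by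
            have hmf := List.mem_filter.mp (by simpa using hx2 : x ∈ F.filter (fun ch => ch ∉ covered))
            exact ⟨hmf.1, by simpa using hmf.2⟩
          intro hnil
          have hx' : x ∈ PySem.Set.diff lset covered := by
            rw [PySem.Set.mem_diff, hmem_lset]
            exact ⟨⟨hx1, hx2'.1⟩, hx2'.2⟩
          rw [hnil] at hx'; simp at hx'
        have hemp' : ¬ ((F.filter (fun ch => ch ∉ covered)).filter (fun ch => ¬ c.toList.contains ch)).length = 0 := by
          rw [List.length_eq_zero_iff, ← hletters']
          exact hne'
        rw [if_pos hhit, if_neg hemp']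
        have hIH := ih (k + 1) covered' hne'
        rw [hletters'] at hIH
        cases hstop : pvStopLoop rest (k + 1) covered' with
        | none =>
          simp only [hstop] at hIH ⊢
          rw [← hIH]
          simp
        | some i =>
          have hge := pvStopLoop_ge rest (k + 1) covered' i hstop
          simp only [hstop] at hIH ⊢
          have harith : (i - k).toNat + 1 = ((i - (k + 1)).toNat + 1) + 1 := by omega
          rw [harith, List.take_succ_cons]
          simp only [pvBuildB]
          rw [← hF, ← hlset, ← hcov', if_pos hdiff]
          rw [← hIH]
          simp
      · -- non-contributing country: covered stays the same
        have hnolet : ∀ x ∈ lset, x ∈ covered := by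
          have hnolet' : ∀ x ∈ c.toList, x ∈ F → x ∈ covered := by simpa using hhit
          intro x hx
          rcases (hmem_lset x).mp hx with ⟨hc, hFm⟩
          exact hnolet' x hc hFm
        have hcovEq : covered' = covered := by
          rw [hcov']
          show PySem.Set.update covered lset = covered
          rw [PySem.Set.update_eq_append_filter]
          have hz : (PySem.Set.ofList lset).filter (fun y => !(PySem.Set.contains covered y)) = [] := by
            apply List.filter_eq_nil_iff.mpr
            intro x hx
            have hxc : x ∈ covered := hnolet x ((PySem.Set.mem_ofList _ _).mp hx)
            simp [PySem.Set.contains, hxc]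
          rw [hz, List.append_nil]
        have hdiff : ¬ (PySem.Set.diff lset covered ≠ []) := by
          simp only [ne_eq, not_not]
          apply List.eq_nil_iff_forall_not_mem.mpr
          intro x hx
          rw [PySem.Set.mem_diff] at hx
          exact hx.2 (hnolet x hx.1)
        rw [if_neg hhit]
        rw [hcovEq]
        have hIH := ih (k + 1) covered hne
        cases hstop : pvStopLoop rest (k + 1) covered with
        | none =>
          simp only [hstop] at hIH ⊢
          exact hIH
        | some i =>
          have hge := pvStopLoop_ge rest (k + 1) covered i hstop
          simp only [hstop] at hIH ⊢
          have harith : (i - k).toNat + 1 = ((i - (k + 1)).toNat + 1) + 1 := by omega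
          rw [harith, List.take_succ_cons]
          simp only [pvBuildB]
          rw [← hF, ← hlset, if_neg hdiff, ← hcov', hcovEq]
          exact hIH

-- ===== VERDICT (by name: the statement is the Claim_ definition above) =====
theorem alphabet_set_spec : Claim_equal_alphabet_set := by
  intro countries _
  unfold Spec_alphabet_set alphabet_set alphabet_set_alt
  dsimp only
  have hA := pvGoA_eq_g (countries.map PySem.Str.lower)
    "abcdefghijklmnopqrstuvwxyz".toList [] (by decide) (by decide) (by simp)
  have hB := pvB_eq_g (countries.map PySem.Str.lower) 0 []
    (by decide)
  have hfull : "abcdefghijklmnopqrstuvwxyz".toList.filter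
      (fun ch => ch ∉ ([] : List Char)) = "abcdefghijklmnopqrstuvwxyz".toList := by decide
  rw [hfull] at hB
  rw [hA, ← hB]
  cases hstop : pvStopLoop (countries.map PySem.Str.lower) 0 [] with
  | none =>
    rw [show pvStopLoop (countries.map PySem.Str.lower) 0 PySem.Set.empty
        = pvStopLoop (countries.map PySem.Str.lower) 0 [] from rfl, hstop]
    simp
  | some i =>
    rw [show pvStopLoop (countries.map PySem.Str.lower) 0 PySem.Set.empty
        = pvStopLoop (countries.map PySem.Str.lower) 0 [] from rfl, hstop]
    have hge := pvStopLoop_ge (countries.map PySem.Str.lower) 0 [] i hstop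
    have hslice : PySem.List.slice (countries.map PySem.Str.lower) none (some (i + 1))
        = (countries.map PySem.Str.lower).take ((i - 0).toNat + 1) := by
      rw [PySem.List.slice_to _ (b := i + 1) (by omega)]
      congr 1
      omega
    simp [hslice]
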